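-- pv_equiv track=rewrite | github.com/ayub404/week14 | week14/practice1.py | check_ingredients
-- ===== SOURCE A (Python) =====
-- def check_ingredients(pantry, recipe):
--
--     pantry_se = [item.lower() for item in pantry]
--     recipe_se = [item.lower() for item in recipe]
--     pantry_set = set(pantry_se)
--     recipe_set = set(recipe_se)
--     missing = sorted(recipe_set - pantry_set)
--     availabe = sorted(recipe_set & pantry_set)
--     return missing, availabe
-- ===== SOURCE B (Python) =====
-- def check_ingredients(pantry, recipe):
--     # Merge-partition: sort both deduped lowered lists once, then walk them in
--     # lockstep with two pointers; no membership test is performed at all.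
--     ps = sorted({item.lower() for item in pantry})
--     rs = sorted({item.lower() for item in recipe})
--     missing, available = [], []
--     i = j = 0
--     while j < len(rs):
--         if i >= len(ps) or rs[j] < ps[i]:
--             missing.append(rs[j])
--             j += 1
--         elif ps[i] < rs[j]:
--             i += 1
--         else:
--             available.append(rs[j])
--             i += 1
--             j += 1
--     return missing, available
-- ===== Notes on version B (the rewrite author's own statement) =====
-- stated objective: alternative
-- what changed: B sorts the deduped lowered pantry and recipe lists once each and then merges them with two pointers, classifying every recipe item as missing or available by order comparisons during the merge, instead of A's hash-set difference/intersection each followed by its own sort.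
import Mathlib
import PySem

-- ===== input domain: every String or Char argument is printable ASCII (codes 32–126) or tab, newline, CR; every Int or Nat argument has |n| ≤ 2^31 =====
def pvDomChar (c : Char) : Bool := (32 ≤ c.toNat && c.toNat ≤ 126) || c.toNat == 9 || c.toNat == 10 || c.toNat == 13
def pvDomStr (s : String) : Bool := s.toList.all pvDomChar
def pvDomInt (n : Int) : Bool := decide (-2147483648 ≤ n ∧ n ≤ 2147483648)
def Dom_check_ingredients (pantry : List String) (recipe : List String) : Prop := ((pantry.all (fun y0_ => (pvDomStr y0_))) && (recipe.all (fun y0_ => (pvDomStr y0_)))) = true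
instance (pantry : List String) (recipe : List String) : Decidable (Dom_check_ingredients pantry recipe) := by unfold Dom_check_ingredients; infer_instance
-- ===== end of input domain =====

-- B merge-partitions the two sorted deduped lowered lists with two pointers (order comparisons only, no membership tests); alternative algorithm, proved equal to A.


-- ===== PORT A =====
def check_ingredients (pantry : List String) (recipe : List String) : List String × List String :=
  let pantry_se := pantry.map PySem.Str.lower
  let recipe_se := recipe.map PySem.Str.lower
  let pantry_set := PySem.Set.ofList pantry_se
  let recipe_set := PySem.Set.ofList recipe_se
  let missing := PySem.List.sorted (PySem.Set.diff recipe_set pantry_set) (fun x => x)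
  let availabe := PySem.List.sorted (PySem.Set.inter recipe_set pantry_set) (fun x => x)
  (missing, availabe)

-- ===== PORT B =====
-- The two-pointer merge loop of Source B, as the obvious structural recursion on the
-- two sorted lists (advancing a pointer = dropping a head).
def pvMergePartition : List String → List String → List String × List String
  | _, [] => ([], [])
  | [], r :: rs => let ma := pvMergePartition [] rs; (r :: ma.1, ma.2)
  | p :: ps, r :: rs =>
    if r < p then let ma := pvMergePartition (p :: ps) rs; (r :: ma.1, ma.2)
    else if p < r then pvMergePartition ps (r :: rs)
    else let ma := pvMergePartition ps rs; (ma.1, r :: ma.2)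
termination_by ps rs => (rs.length, ps.length)

def check_ingredients_alt (pantry : List String) (recipe : List String) : List String × List String :=
  let ps := PySem.List.sorted (PySem.Set.ofList (pantry.map PySem.Str.lower)) (fun x => x)
  let rs := PySem.List.sorted (PySem.Set.ofList (recipe.map PySem.Str.lower)) (fun x => x)
  pvMergePartition ps rs

-- ===== PRECONDITION & SPEC =====
def Spec_check_ingredients (pantry : List String) (recipe : List String) (out : List String × List String) : Prop := out = check_ingredients_alt pantry recipe
instance (pantry : List String) (recipe : List String) (out : List String × List String) : Decidable (Spec_check_ingredients pantry recipe out) := by unfold Spec_check_ingredients; infer_instance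

-- ===== CLAIM (what is proved, stated in full; the proofs are below) =====
def Claim_equal_check_ingredients : Prop := ∀ (pantry : List String) (recipe : List String), Dom_check_ingredients pantry recipe → Spec_check_ingredients pantry recipe (check_ingredients pantry recipe)

-- ===== LEMMAS AND PROOFS =====

-- On strictly sorted inputs the merge partition computes exactly the
-- membership filters A's set difference/intersection compute.
theorem pvMergePartition_eq (ps rs : List String)
    (hps : ps.Pairwise (· < ·)) (hrs : rs.Pairwise (· < ·)) :
    pvMergePartition ps rs
      = (rs.filter (fun x => !decide (x ∈ ps)), rs.filter (fun x => decide (x ∈ ps))) := by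
  induction ps, rs using pvMergePartition.induct with
  | case1 ps => simp [pvMergePartition]
  | case2 r rs ih =>
    rw [pvMergePartition, ih List.Pairwise.nil (List.Pairwise.sublist (List.sublist_cons_self r rs) hrs)]
    simp
  | case3 p ps r rs hlt ih =>
    rw [pvMergePartition, if_pos hlt,
      ih hps (List.Pairwise.sublist (List.sublist_cons_self r rs) hrs)]
    have hnm : r ∉ p :: ps := by
      intro hc
      rcases List.mem_cons.mp hc with h | h
      · exact absurd h (ne_of_lt hlt)
      · exact absurd (lt_trans hlt ((List.pairwise_cons.mp hps).1 _ h)) (lt_irrefl r)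
    have hd : decide (r ∈ p :: ps) = false := decide_eq_false hnm
    rw [List.filter_cons, List.filter_cons, hd]
    simp
  | case4 p ps r rs hnlt hlt ih =>
    rw [pvMergePartition, if_neg hnlt, if_pos hlt,
      ih ((List.pairwise_cons.mp hps).2) hrs]
    have hcong : ∀ x ∈ r :: rs, (decide (x ∈ p :: ps)) = (decide (x ∈ ps)) := by
      intro x hx
      have hpx : p < x := by
        rcases List.mem_cons.mp hx with h | h
        · exact h ▸ hlt
        · exact lt_trans hlt ((List.pairwise_cons.mp hrs).1 _ h)
      simp only [List.mem_cons, decide_eq_decide]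
      exact or_iff_right (ne_of_gt hpx)
    have h1 : List.filter (fun x => !decide (x ∈ p :: ps)) (r :: rs)
        = List.filter (fun x => !decide (x ∈ ps)) (r :: rs) :=
      List.filter_congr (fun x hx => by rw [hcong x hx])
    have h2 : List.filter (fun x => decide (x ∈ p :: ps)) (r :: rs)
        = List.filter (fun x => decide (x ∈ ps)) (r :: rs) :=
      List.filter_congr (fun x hx => by rw [hcong x hx])
    rw [h1, h2]
  | case5 p ps r rs hnlt hnlt' ih =>
    have heq : r = p := le_antisymm (le_of_not_gt hnlt') (le_of_not_gt hnlt)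
    rw [pvMergePartition, if_neg hnlt, if_neg hnlt',
      ih ((List.pairwise_cons.mp hps).2) ((List.pairwise_cons.mp hrs).2)]
    have hcong : ∀ x ∈ rs, (decide (x ∈ p :: ps)) = (decide (x ∈ ps)) := by
      intro x hx
      have hpx : p < x := heq ▸ (List.pairwise_cons.mp hrs).1 _ hx
      simp only [List.mem_cons, decide_eq_decide]
      exact or_iff_right (ne_of_gt hpx)
    have h1 : List.filter (fun x => !decide (x ∈ p :: ps)) rs
        = List.filter (fun x => !decide (x ∈ ps)) rs :=
      List.filter_congr (fun x hx => by rw [hcong x hx])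
    have h2 : List.filter (fun x => decide (x ∈ p :: ps)) rs
        = List.filter (fun x => decide (x ∈ ps)) rs :=
      List.filter_congr (fun x hx => by rw [hcong x hx])
    have hd : decide (r ∈ p :: ps) = true :=
      decide_eq_true (List.mem_cons.mpr (Or.inl heq))
    rw [List.filter_cons, List.filter_cons, hd, h1, h2]
    simp

-- sorting a filtered set equals filtering the sorted set (distinct elements).
theorem pv_sorted_filter (R : List String) (q : String → Bool) :
    PySem.List.sorted ((PySem.Set.ofList R).filter q) (fun x => x)
    = (PySem.List.sorted (PySem.Set.ofList R) (fun x => x)).filter q := by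
  apply PySem.List.sorted_eq_of_perm_of_pairwise_lt
  · exact (PySem.List.sorted_perm (PySem.Set.ofList R) (fun x => x) false).filter q
  · exact List.Pairwise.sublist List.filter_sublist (PySem.List.sorted_ofList_pairwise_lt R)

-- ===== VERDICT (by name: the statement is the Claim_ definition above) =====
theorem check_ingredients_spec : Claim_equal_check_ingredients := by
  intro pantry recipe _
  unfold Spec_check_ingredients check_ingredients check_ingredients_alt PySem.Set.diff PySem.Set.inter
  dsimp only
  rw [pvMergePartition_eq _ _ (PySem.List.sorted_ofList_pairwise_lt _)
    (PySem.List.sorted_ofList_pairwise_lt _)]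
  rw [pv_sorted_filter, pv_sorted_filter]
  have hcong : ∀ x, (((PySem.Set.ofList (pantry.map PySem.Str.lower)).contains x))
      = decide (x ∈ PySem.List.sorted (PySem.Set.ofList (pantry.map PySem.Str.lower)) (fun x => x)) := by
    intro x
    by_cases h : x ∈ PySem.Set.ofList (pantry.map PySem.Str.lower) <;>
      simp [PySem.List.mem_sorted, h]
  have h1 : List.filter (fun x => !(PySem.Set.ofList (pantry.map PySem.Str.lower)).contains x)
        (PySem.List.sorted (PySem.Set.ofList (recipe.map PySem.Str.lower)) (fun x => x))
      = List.filter (fun x => !decide (x ∈ PySem.List.sorted (PySem.Set.ofList (pantry.map PySem.Str.lower)) (fun x => x)))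
        (PySem.List.sorted (PySem.Set.ofList (recipe.map PySem.Str.lower)) (fun x => x)) :=
    List.filter_congr (fun x _ => by rw [hcong x])
  have h2 : List.filter (fun x => (PySem.Set.ofList (pantry.map PySem.Str.lower)).contains x)
        (PySem.List.sorted (PySem.Set.ofList (recipe.map PySem.Str.lower)) (fun x => x))
      = List.filter (fun x => decide (x ∈ PySem.List.sorted (PySem.Set.ofList (pantry.map PySem.Str.lower)) (fun x => x)))
        (PySem.List.sorted (PySem.Set.ofList (recipe.map PySem.Str.lower)) (fun x => x)) :=
    List.filter_congr (fun x _ => by rw [hcong x])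
  rw [h1, h2]
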